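-- pv_equiv track=rewrite | github.com/SamsungLabs/Metis | model/cluster_bandwidth.py | _get_device_placement
-- ===== SOURCE A (Python) =====
-- from collections import defaultdict, Counter
-- from typing import Tuple, Dict, List, Optional
--
-- def _get_device_placement(num_nodes: int, num_devices: int) -> Tuple[Dict, Dict]:
--     rank_map = defaultdict(list)
--     rank_node_map = dict()
--
--     nodes = [num_devices] * num_nodes
--
--     counter = 0
--     for node_num, device_count in zip(range(len(nodes)), nodes):
--         for inner_loop in range(device_count):
--             rank_map[node_num].append(counter)
--             rank_node_map[counter] = node_num
--             counter += 1
--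
--     return rank_map, rank_node_map
-- ===== SOURCE B (Python) =====
-- from collections import defaultdict
--
--
-- def _get_device_placement(num_nodes: int, num_devices: int):
--     rank_node_map = {rank: rank // num_devices
--                      for rank in range(num_nodes * num_devices)}
--     rank_map = defaultdict(list)
--     for rank, node in rank_node_map.items():
--         rank_map[node].append(rank)
--     return rank_map, rank_node_map
-- ===== Notes on version B (the rewrite author's own statement) =====
-- stated objective: simpler
-- what changed: Replaces the nested counter-threading loop by two flat passes: a dict comprehension assigning each rank its node arithmetically (rank // num_devices), then grouping ranks by node; Pre_ excludes inputs where both counts are negative, outside the function's meaningful domain, where A's empty output is an accident of replicating a list a negative number of times.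
-- outside the precondition, e.g. on _get_device_placement(-1, -1): A returns ({}, {}), B returns ({0: [0]}, {0: 0})
import Mathlib
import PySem

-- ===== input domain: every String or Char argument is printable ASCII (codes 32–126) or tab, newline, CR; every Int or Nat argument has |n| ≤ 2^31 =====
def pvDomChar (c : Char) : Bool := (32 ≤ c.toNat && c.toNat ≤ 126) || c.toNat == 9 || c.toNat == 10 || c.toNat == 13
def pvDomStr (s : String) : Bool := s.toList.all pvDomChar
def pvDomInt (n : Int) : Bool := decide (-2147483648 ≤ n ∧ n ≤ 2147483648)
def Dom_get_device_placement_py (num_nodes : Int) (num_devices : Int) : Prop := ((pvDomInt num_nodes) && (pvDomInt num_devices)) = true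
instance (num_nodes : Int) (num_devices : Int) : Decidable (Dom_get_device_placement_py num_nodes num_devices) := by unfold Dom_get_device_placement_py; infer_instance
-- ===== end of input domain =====

-- B replaces A's nested counter-threading loop by two flat passes: a dict comprehension
-- assigning each rank its node arithmetically, then grouping ranks by node (objective: simpler).

-- ===== PORT A =====
-- tail-recursive zip (same values as zip(range(len(nodes)), nodes); stack-safe to evaluate)
def pvZipTR {α β : Type} (xs : List α) (ys : List β) (acc : List (α × β)) : List (α × β) :=
  match xs, ys with
  | x :: xs, y :: ys => pvZipTR xs ys ((x, y) :: acc)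
  | _, _ => acc.reverse

-- literal port of A: nodes = [num_devices]*num_nodes; loop over zip(range(len(nodes)), nodes)
-- threading `counter`; defaultdict append = Dict.modify with default [].
def get_device_placement_py (num_nodes : Int) (num_devices : Int) :
    (List (Int × List Int)) × (List (Int × Int)) :=
  let nodes : List Int := List.replicate num_nodes.toNat num_devices
  let st :=
    (pvZipTR (PySem.List.pyRange 0 (nodes.length : Int) 1) nodes []).foldl
      (fun (st : PySem.Dict Int (List Int) × PySem.Dict Int Int × Int) p =>
        (PySem.List.pyRange 0 p.2 1).foldl
          (fun st _ =>
            (st.1.modify p.1 [] (· ++ [st.2.2]), st.2.1.insert st.2.2 p.1, st.2.2 + 1))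
          st)
      (PySem.Dict.empty, PySem.Dict.empty, 0)
  (st.1.items, st.2.1.items)

-- ===== PORT B =====
-- literal port of Source B: rank_node_map built by a dict comprehension over range(n*d)
-- (node = rank // num_devices), then rank_map grouped from rank_node_map.items().
def get_device_placement_py_alt (num_nodes : Int) (num_devices : Int) :
    (List (Int × List Int)) × (List (Int × Int)) :=
  let rank_node_map : PySem.Dict Int Int :=
    (PySem.List.pyRange 0 (num_nodes * num_devices) 1).foldl
      (fun m r => m.insert r (PySem.Int.floordiv r num_devices)) PySem.Dict.empty
  let rank_map : PySem.Dict Int (List Int) :=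
    rank_node_map.items.foldl
      (fun m p => m.modify p.2 [] (· ++ [p.1])) PySem.Dict.empty
  (rank_map.items, rank_node_map.items)

-- ===== PRECONDITION & SPEC =====
-- Pre_ excludes inputs where both counts are negative — outside the function's meaningful
-- domain; there A's empty result is an accident of replicating a list a negative number of times.
def Pre_get_device_placement_py (num_nodes : Int) (num_devices : Int) : Prop :=
  0 ≤ num_nodes ∨ 0 ≤ num_devices
instance (num_nodes : Int) (num_devices : Int) : Decidable (Pre_get_device_placement_py num_nodes num_devices) := by unfold Pre_get_device_placement_py; infer_instance
def pvWitness_get_device_placement_py : Int × Int := (2, 3)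
def Spec_get_device_placement_py (num_nodes : Int) (num_devices : Int) (out : (List (Int × List Int)) × (List (Int × Int))) : Prop := out = get_device_placement_py_alt num_nodes num_devices
instance (num_nodes : Int) (num_devices : Int) (out : (List (Int × List Int)) × (List (Int × Int))) : Decidable (Spec_get_device_placement_py num_nodes num_devices out) := by unfold Spec_get_device_placement_py; infer_instance

-- ===== CLAIM (what is proved, stated in full; the proofs are below) =====
def Claim_equal_get_device_placement_py : Prop := ∀ (num_nodes : Int) (num_devices : Int), Dom_get_device_placement_py num_nodes num_devices → Pre_get_device_placement_py num_nodes num_devices → Spec_get_device_placement_py num_nodes num_devices (get_device_placement_py num_nodes num_devices)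

-- ===== LEMMAS AND PROOFS =====

-- a foldl whose step ignores its arguments is the identity
theorem pv_foldl_const {α β : Type} (l : List β) (st : α) :
    l.foldl (fun s _ => s) st = st := by
  induction l generalizing st <;> simp_all

-- a fold whose step acts componentwise splits into two independent folds
theorem pv_foldl_split {α β γ : Type} (l : List γ) (f : α → γ → α) (g : β → γ → β)
    (a : α) (b : β) :
    l.foldl (fun s r => (f s.1 r, g s.2 r)) (a, b) = (l.foldl f a, l.foldl g b) := by
  induction l generalizing a b <;> simp_all

-- the tail-recursive zip computes List.zip
theorem pvZipTR_eq {α β : Type} : ∀ (xs : List α) (ys : List β) (acc : List (α × β)),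
    pvZipTR xs ys acc = acc.reverse ++ List.zip xs ys := by
  intro xs
  induction xs with
  | nil => intro ys acc; cases ys <;> simp [pvZipTR]
  | cons x xs ih => intro ys acc; cases ys <;> simp [pvZipTR, ih]

-- zip(range(s, s+len(xs)), xs) is enumerate(xs, s)
theorem pv_zip_enum {α : Type} : ∀ (xs : List α) (s : Int),
    List.zip (PySem.List.pyRange s (s + xs.length) 1) xs = PySem.List.enumerate xs s := by
  intro xs
  induction xs with
  | nil => intro s; simp [PySem.List.pyRange_one_eq_nil, PySem.List.enumerate]
  | cons x xs ih =>
    intro s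
    rw [show ((x :: xs).length : Int) = (xs.length : Int) + 1 by simp]
    rw [PySem.List.pyRange_one_cons (by omega)]
    rw [show s + ((xs.length : Int) + 1) = (s + 1) + xs.length by ring]
    rw [PySem.List.enumerate_cons]
    simp only [List.zip_cons_cons, List.cons.injEq, true_and]
    exact ih (s + 1)

-- A's inner loop, threading the counter c for m iterations with fixed node i,
-- equals the flat step-fold over the rank block [c, c+m)
theorem pv_inner (i : Int) (m : Nat) :
    ∀ (st : PySem.Dict Int (List Int) × PySem.Dict Int Int) (c : Int),
    (PySem.List.pyRange 0 (m : Int) 1).foldl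
      (fun st _ =>
        (st.1.modify i [] (· ++ [st.2.2]), st.2.1.insert st.2.2 i, st.2.2 + 1))
      (st.1, st.2, c)
    = (((PySem.List.pyRange c (c + (m : Int)) 1).foldl
        (fun s r => (s.1.modify i [] (· ++ [r]), s.2.insert r i)) st).1,
       ((PySem.List.pyRange c (c + (m : Int)) 1).foldl
        (fun s r => (s.1.modify i [] (· ++ [r]), s.2.insert r i)) st).2, c + (m : Int)) := by
  induction m with
  | zero => intro st c; simp [PySem.List.pyRange_one_eq_nil]
  | succ m ih =>
    intro st c
    rw [show ((m + 1 : Nat) : Int) = (m : Int) + 1 by push_cast; ring]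
    rw [PySem.List.pyRange_one_succ_right (by omega : (0:Int) ≤ (m : Int))]
    rw [show c + ((m : Int) + 1) = (c + (m : Int)) + 1 by ring]
    rw [PySem.List.pyRange_one_succ_right (by omega : c ≤ c + (m : Int))]
    rw [List.foldl_append, List.foldl_append, ih st c]
    simp

-- A's outer loop over the first k nodes equals a flat fold over range(k*d), for d > 0
theorem pv_outer (d : Int) (hd : 0 < d) (k : Nat) :
    (PySem.List.enumerate (List.replicate k d) 0).foldl
      (fun (st : PySem.Dict Int (List Int) × PySem.Dict Int Int × Int) p =>
        (PySem.List.pyRange 0 p.2 1).foldl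
          (fun st _ =>
            (st.1.modify p.1 [] (· ++ [st.2.2]), st.2.1.insert st.2.2 p.1, st.2.2 + 1)) st)
      (PySem.Dict.empty, PySem.Dict.empty, 0)
    = (((PySem.List.pyRange 0 ((k : Int) * d) 1).foldl
        (fun (st : PySem.Dict Int (List Int) × PySem.Dict Int Int) r =>
          (st.1.modify (PySem.Int.floordiv r d) [] (· ++ [r]),
           st.2.insert r (PySem.Int.floordiv r d)))
        (PySem.Dict.empty, PySem.Dict.empty)).1,
       ((PySem.List.pyRange 0 ((k : Int) * d) 1).foldl
        (fun (st : PySem.Dict Int (List Int) × PySem.Dict Int Int) r =>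
          (st.1.modify (PySem.Int.floordiv r d) [] (· ++ [r]),
           st.2.insert r (PySem.Int.floordiv r d)))
        (PySem.Dict.empty, PySem.Dict.empty)).2, (k : Int) * d) := by
  induction k with
  | zero => simp [PySem.List.pyRange_one_eq_nil]
  | succ k ih =>
    rw [show ((k + 1 : Nat) : Int) * d = (k : Int) * d + d by push_cast; ring]
    rw [List.replicate_succ' (n := k)]
    rw [PySem.List.enumerate_append, List.foldl_append, ih]
    rw [PySem.List.pyRange_one_append 0 ((k : Int) * d) ((k : Int) * d + d)
      (by positivity) (by omega), List.foldl_append]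
    simp only [PySem.List.enumerate, List.foldl_cons, List.foldl_nil, List.length_replicate,
      zero_add]
    have hm : PySem.List.pyRange 0 d 1 = PySem.List.pyRange 0 ((d.toNat : Nat) : Int) 1 := by
      congr 1; omega
    rw [hm, pv_inner, show ((d.toNat : Nat) : Int) = d by omega]
    have hblock : ∀ (x : PySem.Dict Int (List Int) × PySem.Dict Int Int),
        (PySem.List.pyRange ((k : Int) * d) ((k : Int) * d + d) 1).foldl
          (fun s r => (s.1.modify (k : Int) [] (· ++ [r]), s.2.insert r (k : Int))) x
        = (PySem.List.pyRange ((k : Int) * d) ((k : Int) * d + d) 1).foldl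
          (fun (st : PySem.Dict Int (List Int) × PySem.Dict Int Int) r =>
            (st.1.modify (PySem.Int.floordiv r d) [] (· ++ [r]),
             st.2.insert r (PySem.Int.floordiv r d))) x := by
      intro x
      apply PySem.List.foldl_congr_mem
      intro a r hr
      have hb := PySem.List.mem_pyRange_one.1 hr
      have hfd : PySem.Int.floordiv r d = (k : Int) := by
        rw [PySem.Int.floordiv_eq_iff_of_pos hd]
        refine ⟨hb.1, ?_⟩
        calc r < (k : Int) * d + d := hb.2
          _ = ((k : Int) + 1) * d := by ring
      rw [hfd]
    rw [hblock]

-- Source B's dict comprehension over the (distinct, fresh) ranks lists its pairs in range order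
theorem pv_rnm_items (t d : Int) :
    ((PySem.List.pyRange 0 t 1).foldl
      (fun (m : PySem.Dict Int Int) r => m.insert r (PySem.Int.floordiv r d))
      PySem.Dict.empty).items
    = (PySem.List.pyRange 0 t 1).map (fun r => (r, PySem.Int.floordiv r d)) := by
  have := PySem.Dict.items_foldl_insert_fresh (l := PySem.List.pyRange 0 t 1)
    (k := fun r => r) (v := fun r => PySem.Int.floordiv r d) (d := PySem.Dict.empty)
    (by intro a _; simp [PySem.Dict.contains_empty])
    (by simpa using PySem.List.nodup_pyRange_one (a := 0) (b := t))
  simpa using this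

-- ===== VERDICT (by name: the statement is the Claim_ definition above) =====
theorem get_device_placement_py_spec : Claim_equal_get_device_placement_py := by
  intro n d _ hpre
  unfold Spec_get_device_placement_py
  dsimp only [get_device_placement_py, get_device_placement_py_alt]
  rw [pvZipTR_eq, List.reverse_nil, List.nil_append]
  rw [show ((List.replicate n.toNat d).length : Int)
        = 0 + ((List.replicate n.toNat d).length : Int) by ring]
  rw [pv_zip_enum]
  rw [pv_rnm_items, List.foldl_map]
  by_cases hd : 0 < d
  · by_cases hn : 0 ≤ n
    · have hnn : n * d = ((n.toNat : Nat) : Int) * d := by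
        congr 1; omega
      rw [hnn, pv_outer d hd n.toNat,
        pv_foldl_split (l := PySem.List.pyRange 0 (((n.toNat : Nat) : Int) * d) 1)
          (f := fun (s : PySem.Dict Int (List Int)) r =>
            s.modify (PySem.Int.floordiv r d) [] (· ++ [r]))
          (g := fun (s : PySem.Dict Int Int) r =>
            s.insert r (PySem.Int.floordiv r d))]
      rw [pv_rnm_items]
    · -- n < 0, d > 0: both sides are the empty placement
      have h1 : n.toNat = 0 := by omega
      have h2 : PySem.List.pyRange 0 (n * d) 1 = [] :=
        PySem.List.pyRange_one_eq_nil (by nlinarith)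
      simp [h1, h2, PySem.Dict.empty]
  · -- d ≤ 0: A's inner ranges are empty; Pre_ gives 0 ≤ n, so n*d ≤ 0 and B's range is empty
    have hdle : d ≤ 0 := by omega
    have hprod : n * d ≤ 0 := by
      rcases hpre with h | h
      · nlinarith
      · have hz : d = 0 := by omega
        simp [hz]
    have h2 : PySem.List.pyRange 0 (n * d) 1 = [] :=
      PySem.List.pyRange_one_eq_nil (by omega)
    have hA : (PySem.List.enumerate (List.replicate n.toNat d) 0).foldl
        (fun (st : PySem.Dict Int (List Int) × PySem.Dict Int Int × Int) p =>
          (PySem.List.pyRange 0 p.2 1).foldl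
            (fun st _ =>
              (st.1.modify p.1 [] (· ++ [st.2.2]), st.2.1.insert st.2.2 p.1, st.2.2 + 1)) st)
        (PySem.Dict.empty, PySem.Dict.empty, 0)
        = (PySem.Dict.empty, PySem.Dict.empty, 0) := by
      rw [PySem.List.foldl_congr_mem (g := fun st _ => st)]
      · exact pv_foldl_const _ _
      · intro a p hp
        obtain ⟨k, hk, rfl⟩ := (PySem.List.mem_enumerate_iff _ _ p).1 hp
        simp [PySem.List.pyRange_one_eq_nil hdle]
    rw [hA]
    simp [h2, PySem.Dict.empty]
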